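-- pv_equiv track=rewrite | github.com/hrabadabar/Checkio-quests | Words Order.py | words_order
-- ===== SOURCE A (Python) =====
-- def words_order(text: str, words: list) -> bool:
--     # check if every word in words is also present in text
--     if all(words[x] in text.split() for x in range(len(words))):
--             # note where in text each word from words appear
--             indices = [text.split().index(x) for x in words]
--
--             if len(indices) == 1: # only one word in words
--                 return True
--             # check if indices is sorted in ascending order and
--             # if it is already a set and words contain no duplicates
--             if len(indices) > 0 and sorted(set(indices)) == indices:
--                 return True
--     return False
-- ===== SOURCE B (Python) =====
-- def words_order(text: str, words: list) -> bool:
--     # Greedy subsequence scan over the first-occurrence-deduplicated tokens of text.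
--     seen = list(dict.fromkeys(text.split()))
--     j = 0
--     for tok in seen:
--         if j < len(words) and tok == words[j]:
--             j += 1
--     return j == len(words)
-- ===== Notes on version B (the rewrite author's own statement) =====
-- stated objective: alternative
-- what changed: Replaced 'collect first-occurrence indices of each word (re-splitting the text and scanning it per word) and test sortedness via sorted(set(...))' with one split, one dedup pass and a single greedy two-pointer subsequence scan of the word list over the deduplicated tokens.
-- outside the precondition, e.g. on words_order('a b', []): A returns False, B returns True
import Mathlib
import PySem

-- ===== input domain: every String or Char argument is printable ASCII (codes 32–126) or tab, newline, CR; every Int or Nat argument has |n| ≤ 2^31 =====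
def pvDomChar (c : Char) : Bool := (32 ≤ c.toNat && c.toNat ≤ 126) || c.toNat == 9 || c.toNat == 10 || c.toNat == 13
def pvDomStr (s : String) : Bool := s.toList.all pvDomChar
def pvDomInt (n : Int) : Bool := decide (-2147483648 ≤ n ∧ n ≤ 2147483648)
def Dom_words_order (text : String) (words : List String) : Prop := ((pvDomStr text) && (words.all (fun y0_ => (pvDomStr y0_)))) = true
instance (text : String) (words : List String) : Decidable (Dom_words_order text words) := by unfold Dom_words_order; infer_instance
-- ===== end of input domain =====

-- B replaces "collect each word's first-occurrence index, then test sortedness" by a single greedy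
-- subsequence scan of the word list over the first-occurrence-deduplicated tokens (objective: alternative).

-- ===== PORT A =====
def words_order (text : String) (words : List String) : Bool :=
  -- all(words[x] in text.split() for x in range(len(words)))
  if (PySem.List.pyRange 0 (words.length : Int) 1).all
      (fun x => ((PySem.List.pyGet? words x).map
        (fun w => (PySem.Str.split₀ text).contains w)).getD false) then
    -- indices = [text.split().index(x) for x in words]; under the guard every word is present,
    -- so .index never raises and the total form (index? …).getD 0 is exact here
    let indices : List Nat :=
      words.map (fun x => (PySem.List.index? (PySem.Str.split₀ text) x).getD 0)
    if indices.length == 1 then true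
    else if decide (indices.length > 0)
        && (PySem.List.sorted (PySem.Set.ofList indices) (fun i => i) == indices) then true
    else false
  else false

-- ===== PORT B =====
def words_order_alt (text : String) (words : List String) : Bool :=
  -- seen = list(dict.fromkeys(text.split()))
  let seen := PySem.List.dedup (PySem.Str.split₀ text)
  -- j = 0; for tok in seen: if j < len(words) and tok == words[j]: j += 1
  let j := seen.foldl
    (fun (j : Nat) tok => if h : j < words.length then (if tok == words[j] then j + 1 else j) else j) 0
  j == words.length

-- ===== PRECONDITION & SPEC =====
-- Pre_ excludes only words = [], on which A's False and B's True are equally defensible readings of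
-- a vacuous query (A's False falls out of its 'len(indices) > 0' guard, B's True is vacuous subsequence).
def Pre_words_order (text : String) (words : List String) : Prop := words ≠ []
instance (text : String) (words : List String) : Decidable (Pre_words_order text words) := by
  unfold Pre_words_order; infer_instance
def pvWitness_words_order : String × List String := ("a b", ["a", "b"])
def Spec_words_order (text : String) (words : List String) (out : Bool) : Prop := out = words_order_alt text words
instance (text : String) (words : List String) (out : Bool) : Decidable (Spec_words_order text words out) := by unfold Spec_words_order; infer_instance

-- ===== CLAIM (what is proved, stated in full; the proofs are below) =====
def Claim_equal_words_order : Prop := ∀ (text : String) (words : List String), Dom_words_order text words → Pre_words_order text words → Spec_words_order text words (words_order text words)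

-- ===== LEMMAS AND PROOFS =====

-- first-occurrence index of w in l (total form of list.index, exact for w ∈ l)
def fIdx (l : List String) (w : String) : Nat := (PySem.List.index? l w).getD 0

theorem fIdx_cons_ne {x w : String} (l : List String) (hne : w ≠ x) (hw : w ∈ l) :
    fIdx (x :: l) w = fIdx l w + 1 := by
  have h := PySem.List.index?_cons_of_ne (x := x) (v := w) l (Ne.symm hne)
  obtain ⟨k, hk⟩ := Option.isSome_iff_exists.1 ((PySem.List.index?_isSome_iff l w).2 hw)
  simp only [fIdx, h, hk, Option.map_some, Option.getD_some]

theorem foldl_add_acc {α : Type} [BEq α] [LawfulBEq α] (xs : List α) : ∀ acc : List α,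
    List.foldl PySem.Set.add acc xs
      = acc ++ (PySem.Set.ofList xs).filter (fun y => !acc.contains y) := by
  induction xs with
  | nil => intro acc; simp [PySem.Set.ofList, PySem.Set.empty]
  | cons a xs ih =>
    intro acc
    have hof : PySem.Set.ofList (a :: xs)
        = [a] ++ (PySem.Set.ofList xs).filter (fun y => !([a] : List α).contains y) := by
      show List.foldl PySem.Set.add PySem.Set.empty (a :: xs) = _
      rw [List.foldl_cons]
      have h1 : PySem.Set.add PySem.Set.empty a = [a] := by
        simp [PySem.Set.add, PySem.Set.empty]
      rw [h1, ih [a]]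
    rw [List.foldl_cons, ih (PySem.Set.add acc a), hof]
    by_cases ha : a ∈ acc
    · have hadd : PySem.Set.add acc a = acc := by simp [PySem.Set.add, List.contains_eq_mem, ha]
      rw [hadd, List.filter_append, List.filter_filter]
      have h2 : List.filter (fun y => !acc.contains y) [a] = [] := by
        simp [List.contains_eq_mem, ha]
      rw [h2, List.nil_append]
      congr 1
      apply List.filter_congr
      intro y _
      by_cases hy : y = a
      · subst hy; simp [List.contains_eq_mem, ha]
      · simp [List.contains_eq_mem, hy]
    · have hadd : PySem.Set.add acc a = acc ++ [a] := by
        simp [PySem.Set.add, List.contains_eq_mem, ha]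
      rw [hadd, List.filter_append, List.filter_filter]
      have h2 : List.filter (fun y => !acc.contains y) [a] = [a] := by
        simp [List.contains_eq_mem, ha]
      rw [h2, List.append_assoc]
      congr 2
      apply List.filter_congr
      intro y _
      by_cases hy : y = a
      · subst hy; simp [List.contains_eq_mem]
      · simp [List.contains_eq_mem, hy]

theorem ofList_cons {α : Type} [BEq α] [LawfulBEq α] (x : α) (xs : List α) :
    PySem.Set.ofList (x :: xs) = x :: (PySem.Set.ofList xs).filter (fun y => y != x) := by
  show List.foldl PySem.Set.add PySem.Set.empty (x :: xs) = _
  rw [List.foldl_cons]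
  have h1 : PySem.Set.add PySem.Set.empty x = [x] := by simp [PySem.Set.add, PySem.Set.empty]
  rw [h1, foldl_add_acc xs [x]]
  simp only [List.singleton_append, List.cons.injEq, true_and]
  apply List.filter_congr
  intro y _
  simp [List.contains_eq_mem, bne]

theorem ofList_eq_self {α : Type} [BEq α] [LawfulBEq α] (xs : List α) (h : xs.Nodup) :
    PySem.Set.ofList xs = xs := by
  induction xs with
  | nil => simp [PySem.Set.ofList, PySem.Set.empty]
  | cons a xs ih =>
    rw [ofList_cons]
    rw [List.nodup_cons] at h
    rw [ih h.2, List.filter_eq_self.2]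
    intro y hy
    simpa using fun hya : y = a => h.1 (hya ▸ hy)

theorem dedup_pairwise (l : List String) :
    (PySem.List.dedup l).Pairwise (fun a b => fIdx l a < fIdx l b) := by
  induction l with
  | nil => simp [PySem.List.dedup, PySem.Set.ofList, PySem.Set.empty]
  | cons x l ih =>
    rw [PySem.List.dedup_eq_ofList, ofList_cons]
    constructor
    · intro b hb
      have hbl : b ∈ PySem.Set.ofList l := (List.mem_filter.1 hb).1
      have hbne : b ≠ x := by simpa using (List.mem_filter.1 hb).2
      have hbm : b ∈ l := by
        rw [← PySem.List.dedup_eq_ofList] at hbl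
        exact (PySem.List.mem_dedup l b).1 hbl
      have h0 : fIdx (x :: l) x = 0 := by
        simp only [fIdx, PySem.List.index?_cons_self, Option.getD_some]
      rw [h0, fIdx_cons_ne l hbne hbm]
      omega
    · rw [← PySem.List.dedup_eq_ofList]
      have hsub : ((PySem.List.dedup l).filter (fun y => y != x)).Sublist (PySem.List.dedup l) :=
        List.filter_sublist
      refine (ih.sublist hsub).imp_of_mem ?_
      intro a b ha hb hab
      have hax : a ≠ x := by simpa using (List.mem_filter.1 ha).2
      have hbx : b ≠ x := by simpa using (List.mem_filter.1 hb).2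
      have ham : a ∈ l := (PySem.List.mem_dedup l a).1 (List.mem_filter.1 ha).1
      have hbm : b ∈ l := (PySem.List.mem_dedup l b).1 (List.mem_filter.1 hb).1
      rw [fIdx_cons_ne l hax ham, fIdx_cons_ne l hbx hbm]
      omega

-- the two-pointer scan of B, saturated: once j has reached len(words) it stays there
theorem scan_const (words : List String) (l : List String) :
    List.foldl (fun (j : Nat) tok =>
      if h : j < words.length then (if tok == words[j] then j + 1 else j) else j)
      words.length l = words.length := by
  induction l with
  | nil => rfl
  | cons t l ih => simpa using ih

theorem scan_iff (words : List String) (seen : List String) (j : Nat) (hj : j ≤ words.length) :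
    (List.foldl (fun (j : Nat) tok =>
        if h : j < words.length then (if tok == words[j] then j + 1 else j) else j)
        j seen = words.length)
      ↔ (words.drop j).Sublist seen := by
  induction seen generalizing j with
  | nil =>
    simp only [List.foldl_nil, List.sublist_nil, List.drop_eq_nil_iff]
    omega
  | cons t rest ih =>
    simp only [List.foldl_cons]
    by_cases hlt : j < words.length
    · by_cases heq : t = words[j]
      · have hbt : (t == words[j]) = true := by simp [heq]
        rw [dif_pos hlt, if_pos hbt, ih (j + 1) hlt,
          List.drop_eq_getElem_cons hlt, ← heq, List.cons_sublist_cons]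
      · have hbf : (t == words[j]) = false := by simp [heq]
        rw [dif_pos hlt, hbf, if_neg (by simp), ih j hj]
        constructor
        · intro h; exact h.cons t
        · intro h
          rcases List.sublist_cons_iff.1 h with h' | ⟨r, hr, _⟩
          · exact h'
          · rw [List.drop_eq_getElem_cons hlt] at hr
            injection hr with h1 _
            exact absurd h1.symm heq
    · have hje : j = words.length := by omega
      subst hje
      rw [dif_neg hlt, scan_const]
      simp [List.drop_length]

theorem alt_iff (text : String) (words : List String) :
    words_order_alt text words = true
      ↔ words.Sublist (PySem.List.dedup (PySem.Str.split₀ text)) := by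
  unfold words_order_alt
  rw [beq_iff_eq, scan_iff words _ 0 (Nat.zero_le _), List.drop_zero]

theorem guard_iff (text : String) (words : List String) :
    ((PySem.List.pyRange 0 (words.length : Int) 1).all
      (fun x => ((PySem.List.pyGet? words x).map
        (fun w => (PySem.Str.split₀ text).contains w)).getD false)) = true
      ↔ ∀ w ∈ words, w ∈ PySem.Str.split₀ text := by
  rw [PySem.List.pyRange_zero_natCast]
  simp only [List.all_map, List.all_eq_true, List.mem_range, Function.comp,
    PySem.List.pyGet?_natCast]
  constructor
  · intro h w hw
    obtain ⟨k, hk, rfl⟩ := List.mem_iff_getElem.1 hw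
    have := h k hk
    simpa [List.getElem?_eq_getElem hk, List.contains_iff_mem] using this
  · intro h k hk
    simp only [List.getElem?_eq_getElem hk, Option.map_some, Option.getD_some,
      List.contains_iff_mem]
    exact h _ (List.getElem_mem hk)

theorem a_iff (text : String) (words : List String) (hpre : words ≠ [])
    (hmem : ∀ w ∈ words, w ∈ PySem.Str.split₀ text) :
    words_order text words = true
      ↔ (words.map (fIdx (PySem.Str.split₀ text))).Pairwise (· < ·) := by
  unfold words_order
  rw [if_pos ((guard_iff text words).2 hmem)]
  show (if (words.map (fIdx (PySem.Str.split₀ text))).length == 1 then true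
      else if decide ((words.map (fIdx (PySem.Str.split₀ text))).length > 0)
          && (PySem.List.sorted
                (PySem.Set.ofList (words.map (fIdx (PySem.Str.split₀ text)))) (fun i => i)
              == words.map (fIdx (PySem.Str.split₀ text))) then true
      else false) = true ↔ _
  set I := words.map (fIdx (PySem.Str.split₀ text)) with hI
  have hlenI : I.length = words.length := by rw [hI, List.length_map]
  by_cases h1 : words.length = 1
  · obtain ⟨w, rfl⟩ := List.length_eq_one_iff.1 h1
    simp [hI]
  · have hlen : 0 < I.length := by
      rw [hlenI]; exact List.length_pos_iff.2 hpre
    have hne1 : (I.length == 1) = false := by simp [hlenI, h1]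
    have hiff : (PySem.List.sorted (PySem.Set.ofList I) (fun i => i) = I) ↔ I.Pairwise (· < ·) := by
      constructor
      · intro h; rw [← h]; exact PySem.List.sorted_ofList_pairwise_lt _
      · intro hp
        refine PySem.List.sorted_eq_of_perm_of_pairwise_lt _ _ _ ?_ hp
        rw [ofList_eq_self _ (hp.imp (fun h => ne_of_lt h))]
    simp [hne1, hlen, beq_iff_eq, hiff]

theorem core_iff (text : String) (words : List String)
    (hmem : ∀ w ∈ words, w ∈ PySem.Str.split₀ text) :
    words.Sublist (PySem.List.dedup (PySem.Str.split₀ text))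
      ↔ (words.map (fIdx (PySem.Str.split₀ text))).Pairwise (· < ·) := by
  constructor
  · intro hsub
    exact List.pairwise_map.2 ((dedup_pairwise _).sublist hsub)
  · intro hp
    have hpw : words.Pairwise
        (fun a b => fIdx (PySem.Str.split₀ text) a < fIdx (PySem.Str.split₀ text) b) :=
      List.pairwise_map.1 hp
    have hnd : words.Nodup := hpw.imp_of_mem (by
      intro a b _ _ hab heq
      subst heq; exact absurd hab (lt_irrefl _))
    have hsubset : words ⊆ PySem.List.dedup (PySem.Str.split₀ text) := fun w hw =>
      (PySem.List.mem_dedup _ w).2 (hmem w hw)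
    haveI : Std.Antisymm
        (fun a b => fIdx (PySem.Str.split₀ text) a < fIdx (PySem.Str.split₀ text) b) :=
      ⟨fun a b h1 h2 => absurd (h1.trans h2) (lt_irrefl _)⟩
    exact List.sublist_of_subperm_of_pairwise (hnd.subperm hsubset) hpw (dedup_pairwise _)

-- ===== VERDICT (by name: the statement is the Claim_ definition above) =====
theorem words_order_spec : Claim_equal_words_order := by
  intro text words _ hpre
  unfold Spec_words_order
  by_cases hmem : ∀ w ∈ words, w ∈ PySem.Str.split₀ text
  · have h1 : words_order text words = true ↔ words_order_alt text words = true := by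
      rw [a_iff text words hpre hmem, alt_iff, core_iff text words hmem]
    cases ha : words_order text words <;> cases hb : words_order_alt text words <;> simp_all
  · have ha : words_order text words = false := by
      unfold words_order
      rw [if_neg]
      intro h
      exact hmem ((guard_iff text words).1 h)
    have hb : words_order_alt text words = false := by
      rw [← Bool.not_eq_true, alt_iff]
      intro hsub
      exact hmem (fun w hw => (PySem.List.mem_dedup _ w).1 (hsub.subset hw))
    rw [ha, hb]
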